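-- pv_equiv track=rewrite | github.com/hjyoon/baekjoon-answers | 17609.py | dfs
-- ===== SOURCE A (Python) =====
-- def dfs(s, left, right, c):
--     if c > 1:
--         return c
--     if left > right:
--         return c
--     while s[left] == s[right]:
--         left += 1
--         right -= 1
--         if left > right:
--             return c
--     else:
--         a = dfs(s, left+1, right, c+1)
--         b = dfs(s, left, right-1, c+1)
--         return min(a, b)
-- ===== SOURCE B (Python) =====
-- def is_pal(s, lo, hi):
--     while lo <= hi:
--         if s[lo] != s[hi]:
--             return False
--         lo += 1
--         hi -= 1
--     return True
--
--
-- def dfs(s, left, right, c):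
--     if c > 1:
--         return c
--     while left <= right and s[left] == s[right]:
--         left += 1
--         right -= 1
--     if left > right:
--         return c
--     if c >= 1:
--         return 2
--     return c + 1 if is_pal(s, left + 1, right) or is_pal(s, left, right - 1) else 2
-- ===== Notes on version B (the rewrite author's own statement) =====
-- stated objective: alternative
-- what changed: Replaces A's while-loop-plus-recursion (which resolves a mismatch by recursing into dfs with an incremented counter) by a fully iterative two-pointer scan and an explicit iterative is_pal helper that directly classifies the mismatch case (c>=1 -> 2, c==0 -> 1 if either one-sided skip is a palindrome else 2).
-- outside the precondition, e.g. on dfs('caacca', 0, 5, -1): A returns 1, B returns 2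
import Mathlib
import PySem

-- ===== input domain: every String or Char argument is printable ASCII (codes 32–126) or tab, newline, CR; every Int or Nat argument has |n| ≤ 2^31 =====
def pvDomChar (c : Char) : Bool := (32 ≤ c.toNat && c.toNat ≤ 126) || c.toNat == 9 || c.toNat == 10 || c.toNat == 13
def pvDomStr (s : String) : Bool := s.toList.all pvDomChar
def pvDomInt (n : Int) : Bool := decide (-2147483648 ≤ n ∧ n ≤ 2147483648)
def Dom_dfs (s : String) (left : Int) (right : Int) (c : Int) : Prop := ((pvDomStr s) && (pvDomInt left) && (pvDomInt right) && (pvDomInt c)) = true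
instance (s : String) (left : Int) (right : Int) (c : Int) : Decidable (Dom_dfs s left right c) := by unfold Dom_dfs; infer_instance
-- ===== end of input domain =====

-- B replaces A's bounded recursion by an iterative two-pointer scan plus an explicit
-- iterative palindrome-check helper (alternative decomposition, same cost).

-- ===== PORT A =====
-- Literal port of A.  The while loop is dfsLoop (the `hc` proof argument only carries
-- A's `c > 1` guard into the loop for termination; it does not change the computation).
-- The `| _, _ => 0` arm is Python's IndexError (excluded by Pre_dfs).
mutual
def dfs (s : String) (left : Int) (right : Int) (c : Int) : Int :=
  if _h1 : c > 1 then c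
  else if left > right then c
  else dfsLoop s left right c (by omega)
termination_by ((2 - c).toNat, (right - left).toNat, 1)
decreasing_by exact Prod.Lex.right _ (Prod.Lex.right _ (by omega))

def dfsLoop (s : String) (left : Int) (right : Int) (c : Int) (hc : c ≤ 1) : Int :=
  match PySem.List.pyGet? s.toList left, PySem.List.pyGet? s.toList right with
  | some x, some y =>
    if x = y then
      if _h : left + 1 > right - 1 then c
      else dfsLoop s (left + 1) (right - 1) c hc
    else
      min (dfs s (left + 1) right (c + 1)) (dfs s left (right - 1) (c + 1))
  | _, _ => 0
termination_by ((2 - c).toNat, (right - left).toNat, 0)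
decreasing_by
· exact Prod.Lex.right _ (Prod.Lex.left _ _ (by omega))
· exact Prod.Lex.left _ _ (by omega)
· exact Prod.Lex.left _ _ (by omega)
end

-- ===== PORT B =====
-- iterative is_pal(s, lo, hi);  `| _, _ => false` is Python's IndexError (outside Pre_dfs)
def isPalB (s : String) (lo : Int) (hi : Int) : Bool :=
  if lo > hi then true
  else match PySem.List.pyGet? s.toList lo, PySem.List.pyGet? s.toList hi with
  | some x, some y => if x ≠ y then false else isPalB s (lo + 1) (hi - 1)
  | _, _ => false
termination_by (hi - lo + 1).toNat
decreasing_by omega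

-- B's two-pointer while loop: advance while chars match, return the final pointers
def dfsBLoop (s : String) (l : Int) (r : Int) : Int × Int :=
  if l > r then (l, r)
  else match PySem.List.pyGet? s.toList l, PySem.List.pyGet? s.toList r with
  | some x, some y => if x = y then dfsBLoop s (l + 1) (r - 1) else (l, r)
  | _, _ => (l, r)
termination_by (r - l + 1).toNat
decreasing_by omega

def dfs_alt (s : String) (left : Int) (right : Int) (c : Int) : Int :=
  if c > 1 then c
  else
    let p := dfsBLoop s left right
    if p.1 > p.2 then c
    else if c ≥ 1 then 2
    else if isPalB s (p.1 + 1) p.2 || isPalB s p.1 (p.2 - 1) then c + 1 else 2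

-- ===== PRECONDITION & SPEC =====
-- Pre_ excludes (a) out-of-range indices, where A raises IndexError, and (b) negative c,
-- outside the natural domain of the deletion counter (the problem calls dfs(s,0,len-1,0)):
-- there (when the guards c>1 / left>right do not fire) A explores extra deletion levels
-- that B's fixed classification does not.
def Pre_dfs (s : String) (left : Int) (right : Int) (c : Int) : Prop :=
  c > 1 ∨ left > right ∨
    (0 ≤ c ∧ -(s.toList.length : Int) ≤ left ∧ left < s.toList.length ∧
     -(s.toList.length : Int) ≤ right ∧ right < s.toList.length)
instance (s : String) (left : Int) (right : Int) (c : Int) : Decidable (Pre_dfs s left right c) := by unfold Pre_dfs; infer_instance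

def pvWitness_dfs : String × Int × Int × Int := ("abcba", 0, 4, 0)

def Spec_dfs (s : String) (left : Int) (right : Int) (c : Int) (out : Int) : Prop := out = dfs_alt s left right c
instance (s : String) (left : Int) (right : Int) (c : Int) (out : Int) : Decidable (Spec_dfs s left right c out) := by unfold Spec_dfs; infer_instance

-- ===== CLAIM (what is proved, stated in full; the proofs are below) =====
def Claim_equal_dfs : Prop := ∀ (s : String) (left : Int) (right : Int) (c : Int), Dom_dfs s left right c → Pre_dfs s left right c → Spec_dfs s left right c (dfs s left right c)

-- ===== LEMMAS AND PROOFS =====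

-- an in-range index yields a character
lemma pyGet_some (s : String) (i : Int)
    (h1 : -(s.toList.length : Int) ≤ i) (h2 : i < s.toList.length) :
    ∃ x, PySem.List.pyGet? s.toList i = some x := by
  cases hx : PySem.List.pyGet? s.toList i with
  | some x => exact ⟨x, rfl⟩
  | none =>
    rw [PySem.List.pyGet?_eq_none_iff] at hx
    exact absurd ⟨h1, h2⟩ hx

-- A's inner while loop at c = 1 is exactly B's palindrome test
lemma loop_one (s : String) :
    ∀ n l r, (r - l).toNat ≤ n → l ≤ r →
      -(s.toList.length : Int) ≤ l → l < s.toList.length →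
      -(s.toList.length : Int) ≤ r → r < s.toList.length → ∀ (hc : (1 : Int) ≤ 1),
      dfsLoop s l r 1 hc = if isPalB s l r then 1 else 2 := by
  intro n
  induction n using Nat.strong_induction_on with
  | _ n ih =>
    intro l r hn hlr h1 h2 h3 h4 hc
    obtain ⟨x, hx⟩ := pyGet_some s l h1 h2
    obtain ⟨y, hy⟩ := pyGet_some s r h3 h4
    rw [dfsLoop.eq_def, isPalB]
    simp only [hx, hy, if_neg (show ¬ l > r by omega)]
    by_cases hxy : x = y
    · subst hxy
      simp only [if_true, ne_eq, not_true_eq_false, if_false]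
      by_cases hcross : l + 1 > r - 1
      · rw [dif_pos hcross, isPalB]
        simp [hcross]
      · rw [dif_neg hcross]
        rw [ih (n - 1) (by omega) (l + 1) (r - 1) (by omega) (by omega) (by omega)
            (by omega) (by omega) (by omega) hc]
    · have e2 : ∀ a b : Int, dfs s a b (1 + 1) = 2 := by
        intro a b; rw [dfs]; norm_num
      simp only [if_neg hxy, ne_eq, if_pos hxy, e2]
      norm_num

-- A at c = 1 is exactly the palindrome test
lemma dfs_one (s : String) (l r : Int)
    (hv : l > r ∨ (-(s.toList.length : Int) ≤ l ∧ l < s.toList.length ∧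
                   -(s.toList.length : Int) ≤ r ∧ r < s.toList.length)) :
    dfs s l r 1 = if isPalB s l r then 1 else 2 := by
  by_cases hlr : l > r
  · rw [dfs, isPalB]
    simp [hlr]
  · rcases hv with h | ⟨h1, h2, h3, h4⟩
    · omega
    rw [dfs, dif_neg (show ¬ (1 : Int) > 1 by omega), if_neg hlr]
    exact loop_one s ((r - l).toNat) l r le_rfl (by omega) h1 h2 h3 h4 _

-- the A-loop against B's pipeline, for c = 0 or 1
lemma loop_main (s : String) :
    ∀ n l r c, (r - l).toNat ≤ n → (c = 0 ∨ c = 1) → l ≤ r →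
      -(s.toList.length : Int) ≤ l → l < s.toList.length →
      -(s.toList.length : Int) ≤ r → r < s.toList.length → ∀ (hc : c ≤ 1),
      dfsLoop s l r c hc =
        (if (dfsBLoop s l r).1 > (dfsBLoop s l r).2 then c
         else if c ≥ 1 then 2
         else if isPalB s ((dfsBLoop s l r).1 + 1) (dfsBLoop s l r).2
                 || isPalB s (dfsBLoop s l r).1 ((dfsBLoop s l r).2 - 1) then c + 1 else 2) := by
  intro n
  induction n using Nat.strong_induction_on with
  | _ n ih =>
    intro l r c hn hc01 hlr h1 h2 h3 h4 hc
    obtain ⟨x, hx⟩ := pyGet_some s l h1 h2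
    obtain ⟨y, hy⟩ := pyGet_some s r h3 h4
    rw [dfsLoop.eq_def, dfsBLoop.eq_def]
    simp only [hx, hy, if_neg (show ¬ l > r by omega)]
    by_cases hxy : x = y
    · subst hxy
      simp only [if_true]
      by_cases hcross : l + 1 > r - 1
      · rw [dif_pos hcross, dfsBLoop.eq_def]
        simp [hcross]
      · rw [dif_neg hcross]
        exact ih (n - 1) (by omega) (l + 1) (r - 1) c (by omega) hc01 (by omega)
          (by omega) (by omega) (by omega) (by omega) hc
    · have hne : l ≠ r := by
        intro h; rw [h, hy] at hx; exact hxy (Option.some.inj hx).symm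
      simp only [if_neg hxy, if_neg (show ¬ l > r by omega)]
      rcases hc01 with rfl | rfl
      · have e1 : dfs s (l + 1) r (0 + 1) = if isPalB s (l + 1) r then 1 else 2 := by
          rw [show (0 : Int) + 1 = 1 by norm_num]
          exact dfs_one s (l + 1) r (Or.inr ⟨by omega, by omega, by omega, by omega⟩)
        have e2 : dfs s l (r - 1) (0 + 1) = if isPalB s l (r - 1) then 1 else 2 := by
          rw [show (0 : Int) + 1 = 1 by norm_num]
          exact dfs_one s l (r - 1) (Or.inr ⟨by omega, by omega, by omega, by omega⟩)
        rw [e1, e2]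
        by_cases p1 : isPalB s (l + 1) r <;> by_cases p2 : isPalB s l (r - 1) <;>
          simp [p1, p2]
      · have e2 : ∀ a b : Int, dfs s a b 2 = 2 := by
          intro a b; rw [dfs]; norm_num
        simp [e2]

-- ===== VERDICT (by name: the statement is the Claim_ definition above) =====
theorem dfs_spec : Claim_equal_dfs := by
  intro s left right c _hd hpre
  unfold Spec_dfs
  by_cases hc2 : c > 1
  · rw [dfs, dif_pos hc2, dfs_alt, if_pos hc2]
  · by_cases hlr : left > right
    · rw [dfs, dif_neg hc2, if_pos hlr, dfs_alt, if_neg hc2]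
      rw [dfsBLoop.eq_def]
      simp [hlr]
    · have hr : 0 ≤ c ∧ -(s.toList.length : Int) ≤ left ∧ left < s.toList.length ∧
          -(s.toList.length : Int) ≤ right ∧ right < s.toList.length := by
        rcases hpre with h | h | h
        · omega
        · omega
        · exact h
      obtain ⟨hc0, h1, h2, h3, h4⟩ := hr
      rw [dfs, dif_neg hc2, if_neg hlr]
      rw [loop_main s ((right - left).toNat) left right c le_rfl (by omega) (by omega)
          h1 h2 h3 h4 (by omega)]
      rw [dfs_alt, if_neg hc2]
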